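-- pv_equiv track=rewrite | github.com/baleen37/tv-strategy | src/strategies/validator.py | check_quotes
-- ===== SOURCE A (Python) =====
-- def check_quotes(content: str) -> bool:
--     """Check string quote matching."""
--     in_quote = False
--     escape_next = False
--
--     for char in content:
--         if escape_next:
--             escape_next = False
--             continue
--
--         if char == "\\":
--             escape_next = True
--             continue
--
--         if char == '"':
--             in_quote = not in_quote
--
--     return not in_quote
-- ===== SOURCE B (Python) =====
-- import re
--
-- def check_quotes(content: str) -> bool:
--     """Check string quote matching."""
--     cleaned = re.sub(r'\\.', '', content, flags=re.DOTALL)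
--     return cleaned.count('"') % 2 == 0
-- ===== Notes on version B (the rewrite author's own statement) =====
-- stated objective: simpler
-- what changed: Replaced the per-character in_quote/escape_next state machine by a regex pass that deletes every backslash-plus-next-char pair and a parity check on the remaining double quotes.
import Mathlib
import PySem

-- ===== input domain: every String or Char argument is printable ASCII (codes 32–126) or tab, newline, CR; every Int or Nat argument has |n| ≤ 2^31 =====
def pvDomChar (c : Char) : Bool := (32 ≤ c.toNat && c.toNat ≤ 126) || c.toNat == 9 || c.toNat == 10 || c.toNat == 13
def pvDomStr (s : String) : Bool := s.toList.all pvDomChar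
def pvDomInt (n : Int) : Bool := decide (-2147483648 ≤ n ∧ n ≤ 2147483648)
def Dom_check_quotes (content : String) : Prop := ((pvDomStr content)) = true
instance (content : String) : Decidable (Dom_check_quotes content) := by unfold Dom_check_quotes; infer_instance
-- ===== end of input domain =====

-- B replaces A's per-character in_quote/escape_next state machine by an escape-stripping
-- pass followed by a parity count of the surviving double quotes (objective: simpler).

-- ===== PORT A =====
-- the loop body of A, over the state (in_quote, escape_next)
def pvStepA (st : Bool × Bool) (c : Char) : Bool × Bool :=
  if st.2 then (st.1, false)
  else if c = '\\' then (st.1, true)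
  else if c = '"' then (!st.1, st.2)
  else st

def check_quotes (content : String) : Bool :=
  !(content.toList.foldl pvStepA (false, false)).1

-- ===== PORT B =====
-- re.sub(r'\\.', '', content, flags=re.DOTALL): delete each backslash-plus-next-char pair,
-- left to right; a lone trailing backslash has no following char and is kept.
def pvStripEsc : List Char → List Char
  | [] => []
  | ['\\'] => ['\\']
  | '\\' :: _ :: rest => pvStripEsc rest
  | c :: rest => c :: pvStripEsc rest

def check_quotes_alt (content : String) : Bool :=
  (pvStripEsc content.toList).count '"' % 2 = 0

-- ===== PRECONDITION & SPEC =====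
def Spec_check_quotes (content : String) (out : Bool) : Prop := out = check_quotes_alt content
instance (content : String) (out : Bool) : Decidable (Spec_check_quotes content out) := by unfold Spec_check_quotes; infer_instance

-- ===== CLAIM (what is proved, stated in full; the proofs are below) =====
def Claim_equal_check_quotes : Prop := ∀ (content : String), Dom_check_quotes content → Spec_check_quotes content (check_quotes content)

-- ===== LEMMAS AND PROOFS =====

theorem pvStepA_loop (l : List Char) (q : Bool) :
    (l.foldl pvStepA (q, false)).1 = (xor q (decide ((pvStripEsc l).count '"' % 2 = 1))) := by
  fun_induction pvStripEsc l generalizing q with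
  | case1 =>
      simp
  | case2 =>
      simp [pvStepA]
  | case3 c rest ih =>
      have h1 : pvStepA (q, false) '\\' = (q, true) := by simp [pvStepA]
      have h2 : pvStepA (q, true) c = (q, false) := by simp [pvStepA]
      simp [List.foldl, h1, h2, ih]
  | case4 c rest h1 h2 ih =>
      by_cases hq : c = '"'
      · subst hq
        have : pvStepA (q, false) '"' = (!q, false) := by simp [pvStepA]
        simp only [List.foldl, this, ih, List.count_cons]
        rcases Nat.mod_two_eq_zero_or_one ((pvStripEsc rest).count '"') with h | h <;>
          cases q <;> simp [h, Nat.add_mod]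
      · have hc : c ≠ '\\' := by
          intro h; subst h
          cases rest with
          | nil => exact h1 rfl rfl
          | cons a b => exact h2 a b rfl rfl
        have : pvStepA (q, false) c = (q, false) := by simp [pvStepA, hc, hq]
        simp [List.foldl, this, ih, hq]

-- ===== VERDICT (by name: the statement is the Claim_ definition above) =====
theorem check_quotes_spec : Claim_equal_check_quotes := by
  intro content _
  unfold Spec_check_quotes check_quotes check_quotes_alt
  rw [pvStepA_loop]
  rcases Nat.mod_two_eq_zero_or_one ((pvStripEsc content.toList).count '"') with h | h <;> simp [h]
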